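-- pv_equiv track=rewrite | github.com/benchng/python_onsite | week_02/08_dictionaries/09_01_duplicates.py | duplicate_checker
-- ===== SOURCE A (Python) =====
-- def duplicate_checker(user_list):
--     my_dict = {}
--     for i in user_list:
--         my_dict[i] = 0
--
--     for i in user_list:
--         my_dict[i] +=1
--
--     for i in my_dict:
--         if my_dict[i] > 1:
--             return True
--             #my_dict[i] = True
--
--     return False
-- ===== SOURCE B (Python) =====
-- def duplicate_checker(user_list):
--     return len(set(user_list)) != len(user_list)
-- ===== Notes on version B (the rewrite author's own statement) =====
-- stated objective: simpler
-- what changed: Replaces A's three passes (build a zeroed dict, count occurrences, scan counts for > 1) with a single set construction plus a length comparison: duplicates exist iff len(set(xs)) != len(xs).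
import Mathlib
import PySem

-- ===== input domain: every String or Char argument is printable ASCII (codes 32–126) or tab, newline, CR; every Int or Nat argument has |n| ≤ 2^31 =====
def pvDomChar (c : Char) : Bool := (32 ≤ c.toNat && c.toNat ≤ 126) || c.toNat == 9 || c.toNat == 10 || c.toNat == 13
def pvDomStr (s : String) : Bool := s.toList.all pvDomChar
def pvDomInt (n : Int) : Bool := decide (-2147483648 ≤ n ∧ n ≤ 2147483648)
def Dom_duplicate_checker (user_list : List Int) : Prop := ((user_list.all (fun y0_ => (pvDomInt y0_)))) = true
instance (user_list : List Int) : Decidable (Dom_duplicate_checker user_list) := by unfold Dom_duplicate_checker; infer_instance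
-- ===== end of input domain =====

-- B replaces A's three passes (zeroed dict, count, scan) by set-size vs list-length; objective: simpler.

-- ===== PORT A =====
def duplicate_checker (user_list : List Int) : Bool :=
  -- my_dict = {}; for i in user_list: my_dict[i] = 0
  let d0 : PySem.Dict Int Int := user_list.foldl (fun d i => d.insert i 0) PySem.Dict.empty
  -- for i in user_list: my_dict[i] += 1   (key always present, so getD is exact here)
  let d1 : PySem.Dict Int Int := user_list.foldl (fun d i => d.insert i (d.getD i 0 + 1)) d0
  -- for i in my_dict: if my_dict[i] > 1: return True;  return False
  d1.keys.any (fun i => decide (1 < d1.getD i 0))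

-- ===== PORT B =====
def duplicate_checker_alt (user_list : List Int) : Bool :=
  decide ((PySem.Set.ofList user_list).length ≠ user_list.length)

-- ===== PRECONDITION & SPEC =====
def Spec_duplicate_checker (user_list : List Int) (out : Bool) : Prop := out = duplicate_checker_alt user_list
instance (user_list : List Int) (out : Bool) : Decidable (Spec_duplicate_checker user_list out) := by unfold Spec_duplicate_checker; infer_instance

-- ===== CLAIM (what is proved, stated in full; the proofs are below) =====
def Claim_equal_duplicate_checker : Prop := ∀ (user_list : List Int), Dom_duplicate_checker user_list → Spec_duplicate_checker user_list (duplicate_checker user_list)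

-- ===== LEMMAS AND PROOFS =====

-- Set.ofList xs is a sublist of xs (foldl Set.add stays inside s ++ rest).
theorem pv_foldl_add_sublist (xs : List Int) : ∀ s : PySem.Set Int,
    (xs.foldl PySem.Set.add s).Sublist (s ++ xs) := by
  induction xs with
  | nil => intro s; simp
  | cons x t ih =>
    intro s
    have h1 := ih (PySem.Set.add s x)
    have h2 : (PySem.Set.add s x).Sublist (s ++ [x]) := by
      unfold PySem.Set.add
      split
      · exact List.sublist_append_left s [x]
      · exact List.Sublist.refl _
    have h3 : (t.foldl PySem.Set.add (PySem.Set.add s x)).Sublist ((s ++ [x]) ++ t) :=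
      h1.trans (List.Sublist.append_right h2 t)
    simpa using h3

theorem pv_ofList_sublist (xs : List Int) : (PySem.Set.ofList xs).Sublist xs := by
  have h := pv_foldl_add_sublist xs []
  simpa [PySem.Set.ofList_eq_foldl] using h

theorem pv_ofList_of_nodup (xs : List Int) (h : xs.Nodup) : PySem.Set.ofList xs = xs := by
  have key : ∀ (l : List Int) (s : PySem.Set Int), l.Nodup → (∀ x ∈ l, x ∉ s) →
      l.foldl PySem.Set.add s = s ++ l := by
    intro l
    induction l with
    | nil => intro s _ _; simp
    | cons x t ih =>
      intro s hnd hdisj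
      have hxns : x ∉ s := hdisj x (by simp)
      have hadd : PySem.Set.add s x = s ++ [x] := by
        unfold PySem.Set.add
        have : PySem.Set.contains s x = false := by
          by_contra hc
          exact hxns ((PySem.Set.contains_iff _ _).mp (by simpa using Bool.of_not_eq_false hc))
        simp [PySem.Set.contains] at this ⊢
        intro hmem
        exact absurd (by simpa using hmem) hxns
      have hnd' : t.Nodup := (List.nodup_cons.mp hnd).2
      have hxnt : x ∉ t := (List.nodup_cons.mp hnd).1
      have hdisj' : ∀ y ∈ t, y ∉ PySem.Set.add s x := by
        intro y hy
        rw [hadd]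
        simp only [List.mem_append, List.mem_singleton]
        rintro (hys | rfl)
        · exact hdisj y (by simp [hy]) hys
        · exact hxnt hy
      calc ((x :: t).foldl PySem.Set.add s)
          = t.foldl PySem.Set.add (PySem.Set.add s x) := rfl
        _ = (PySem.Set.add s x) ++ t := ih _ hnd' hdisj'
        _ = s ++ x :: t := by rw [hadd]; simp
  have h0 := key xs [] h (by simp)
  simpa [PySem.Set.ofList_eq_foldl] using h0

theorem pv_len_ofList_iff (xs : List Int) :
    (PySem.Set.ofList xs).length = xs.length ↔ xs.Nodup := by
  constructor
  · intro hlen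
    have heq : PySem.Set.ofList xs = xs := (pv_ofList_sublist xs).eq_of_length hlen
    have := PySem.Set.nodup_ofList (xs := xs)
    rwa [heq] at this
  · intro hnd
    rw [pv_ofList_of_nodup xs hnd]

-- d0 (all values 0) has getD · 0 = 0 at every key.
theorem pv_getD_zero (xs : List Int) : ∀ (d : PySem.Dict Int Int),
    (∀ k, d.getD k 0 = 0) → ∀ k, (xs.foldl (fun d i => d.insert i 0) d).getD k 0 = 0 := by
  induction xs with
  | nil => intro d h k; simpa using h k
  | cons x t ih =>
    intro d h k
    apply ih
    intro k'
    rw [PySem.Dict.getD_insert]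
    split <;> simp [h k']

theorem pv_A_eq_any_count (xs : List Int) :
    duplicate_checker xs
      = (PySem.Set.ofList xs).any (fun k => decide (1 < (xs.count k : Int))) := by
  unfold duplicate_checker
  have hkeys : ((xs.foldl (fun d i => d.insert i (d.getD i 0 + 1))
      (xs.foldl (fun d i => d.insert i (0 : Int)) PySem.Dict.empty)).keys)
      = PySem.Set.update (xs.foldl (fun d i => d.insert i (0 : Int)) PySem.Dict.empty).keys xs := by
    exact PySem.Dict.keys_foldl_insert xs _ _
  have hkeys0 : (xs.foldl (fun d i => d.insert i (0 : Int)) PySem.Dict.empty).keys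
      = PySem.Set.update ([] : List Int) xs := PySem.Dict.keys_foldl_insert xs _ _
  have hupd0 : PySem.Set.update ([] : List Int) xs = PySem.Set.ofList xs := by
    simp [PySem.Set.update, PySem.Set.ofList_eq_foldl]
  have hidem : PySem.Set.update (PySem.Set.ofList xs) xs = PySem.Set.ofList xs := by
    have key : ∀ (l : List Int) (s : PySem.Set Int), (∀ x ∈ l, x ∈ s) →
        l.foldl PySem.Set.add s = s := by
      intro l
      induction l with
      | nil => intro s _; rfl
      | cons x t ih =>
        intro s hmem
        have : PySem.Set.add s x = s := by
          unfold PySem.Set.add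
          simp
          exact hmem x (by simp)
        calc ((x :: t).foldl PySem.Set.add s)
            = t.foldl PySem.Set.add (PySem.Set.add s x) := rfl
          _ = t.foldl PySem.Set.add s := by rw [this]
          _ = s := ih s (fun y hy => hmem y (by simp [hy]))
    exact key xs _ (fun x hx => (PySem.Set.mem_ofList _ _).mpr hx)
  have hgd : ∀ k, ((xs.foldl (fun d i => d.insert i (d.getD i 0 + 1))
      (xs.foldl (fun d i => d.insert i (0 : Int)) PySem.Dict.empty)).getD k 0)
      = (xs.count k : Int) := by
    intro k
    rw [PySem.Dict.getD_foldl_insert_add_one]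
    rw [pv_getD_zero xs PySem.Dict.empty (by intro k'; simp) k]
    ring
  simp only [hkeys, hkeys0, hupd0, hidem]
  apply PySem.List.any_congr_mem
  intro k _
  rw [hgd k]

-- ===== VERDICT (by name: the statement is the Claim_ definition above) =====
theorem duplicate_checker_spec : Claim_equal_duplicate_checker := by
  intro xs _
  unfold Spec_duplicate_checker duplicate_checker_alt
  rw [pv_A_eq_any_count]
  by_cases hnd : xs.Nodup
  · have hlen : (PySem.Set.ofList xs).length = xs.length := (pv_len_ofList_iff xs).mpr hnd
    have hcnt : ∀ k, xs.count k ≤ 1 := List.nodup_iff_count_le_one.mp hnd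
    have : ((PySem.Set.ofList xs).any (fun k => decide (1 < (xs.count k : Int)))) = false := by
      rw [List.any_eq_false]
      intro k _
      simp only [decide_eq_true_eq]
      push_neg
      exact_mod_cast hcnt k
    rw [this]
    simp [hlen]
  · have hlen : (PySem.Set.ofList xs).length ≠ xs.length := by
      intro h; exact hnd ((pv_len_ofList_iff xs).mp h)
    obtain ⟨k, hk⟩ : ∃ k, 1 < xs.count k := by
      by_contra hall
      push_neg at hall
      exact hnd (List.nodup_iff_count_le_one.mpr hall)
    have hkmem : k ∈ xs := List.count_pos_iff.mp (by omega)
    have : ((PySem.Set.ofList xs).any (fun k => decide (1 < (xs.count k : Int)))) = true := by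
      rw [List.any_eq_true]
      exact ⟨k, (PySem.Set.mem_ofList _ _).mpr hkmem, by simp; exact_mod_cast hk⟩
    rw [this]
    simp [hlen]
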